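-- pv_equiv track=rewrite | github.com/cemevecen/seo_agent | backend/main.py | _normalize_lighthouse_issue_order
-- ===== SOURCE A (Python) =====
-- def _normalize_lighthouse_issue_order(analysis: dict | None) -> dict | None:
--     if not analysis or not analysis.get("issues"):
--         return analysis
--
--     def issue_sort_key(issue: dict) -> tuple[int, int, str]:
--         issue_id = str(issue.get("id") or "")
--         title = str(issue.get("title_en") or issue.get("title") or "").lower()
--         priority_order = {"CRITICAL": 0, "HIGH": 1, "MEDIUM": 2, "LOW": 3}
--         insight_like = (
--             "insight" in issue_id
--             or any(
--                 token in issue_id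
--                 for token in (
--                     "unused",
--                     "render-blocking",
--                     "cache",
--                     "image",
--                     "document-latency",
--                     "server-response",
--                     "network",
--                     "redirect",
--                     "font-display",
--                 )
--             )
--             or any(
--                 phrase in title
--                 for phrase in (
--                     "use ",
--                     "reduce ",
--                     "eliminate ",
--                     "improve ",
--                     "avoid ",
--                     "serve ",
--                     "defer ",
--                 )
--             )
--         )
--         metric_like = issue_id in {
--             "largest-contentful-paint",
--             "first-contentful-paint",
--             "speed-index",
--             "interactive",
--             "max-potential-fid",
--             "total-blocking-time",
--             "cumulative-layout-shift",
--         }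
--         bucket = 0 if insight_like else 2 if metric_like else 1
--         return (bucket, priority_order.get(str(issue.get("priority") or "").upper(), 9), issue_id)
--
--     normalized = dict(analysis)
--     normalized["issues"] = sorted(list(analysis.get("issues") or []), key=issue_sort_key)
--     return normalized
-- ===== SOURCE B (Python) =====
-- _PRIORITY_ORDER = {"CRITICAL": 0, "HIGH": 1, "MEDIUM": 2, "LOW": 3}
--
-- _INSIGHT_ID_TOKENS = (
--     "insight",
--     "unused",
--     "render-blocking",
--     "cache",
--     "image",
--     "document-latency",
--     "server-response",
--     "network",
--     "redirect",
--     "font-display",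
-- )
--
-- _ACTION_PHRASES = ("use ", "reduce ", "eliminate ", "improve ", "avoid ", "serve ", "defer ")
--
-- _METRIC_IDS = frozenset({
--     "largest-contentful-paint",
--     "first-contentful-paint",
--     "speed-index",
--     "interactive",
--     "max-potential-fid",
--     "total-blocking-time",
--     "cumulative-layout-shift",
-- })
--
--
-- def _normalize_lighthouse_issue_order(analysis: dict | None) -> dict | None:
--     if not analysis or not analysis.get("issues"):
--         return analysis
--
--     def _issue_id(issue: dict) -> str:
--         return str(issue.get("id") or "")
--
--     def _bucket(issue: dict) -> int:
--         issue_id = _issue_id(issue)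
--         title = str(issue.get("title_en") or issue.get("title") or "").lower()
--         if any(token in issue_id for token in _INSIGHT_ID_TOKENS):
--             return 0
--         if any(phrase in title for phrase in _ACTION_PHRASES):
--             return 0
--         return 2 if issue_id in _METRIC_IDS else 1
--
--     def _rank(issue: dict) -> int:
--         return _PRIORITY_ORDER.get(str(issue.get("priority") or "").upper(), 9)
--
--     buckets: tuple[list, list, list] = ([], [], [])
--     for issue in analysis.get("issues") or []:
--         buckets[_bucket(issue)].append(issue)
--
--     ordered: list = []
--     for group in buckets:
--         group.sort(key=lambda issue: (_rank(issue), _issue_id(issue)))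
--         ordered.extend(group)
--
--     normalized = dict(analysis)
--     normalized["issues"] = ordered
--     return normalized
-- ===== Notes on version B (the rewrite author's own statement) =====
-- stated objective: alternative
-- what changed: Replaces the single sorted() call on a composite (bucket, priority, id) key by a one-pass partition of the issues into three bucket lists followed by a stable per-bucket sort on (priority rank, id) and concatenation bucket0+bucket1+bucket2.
import Mathlib
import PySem

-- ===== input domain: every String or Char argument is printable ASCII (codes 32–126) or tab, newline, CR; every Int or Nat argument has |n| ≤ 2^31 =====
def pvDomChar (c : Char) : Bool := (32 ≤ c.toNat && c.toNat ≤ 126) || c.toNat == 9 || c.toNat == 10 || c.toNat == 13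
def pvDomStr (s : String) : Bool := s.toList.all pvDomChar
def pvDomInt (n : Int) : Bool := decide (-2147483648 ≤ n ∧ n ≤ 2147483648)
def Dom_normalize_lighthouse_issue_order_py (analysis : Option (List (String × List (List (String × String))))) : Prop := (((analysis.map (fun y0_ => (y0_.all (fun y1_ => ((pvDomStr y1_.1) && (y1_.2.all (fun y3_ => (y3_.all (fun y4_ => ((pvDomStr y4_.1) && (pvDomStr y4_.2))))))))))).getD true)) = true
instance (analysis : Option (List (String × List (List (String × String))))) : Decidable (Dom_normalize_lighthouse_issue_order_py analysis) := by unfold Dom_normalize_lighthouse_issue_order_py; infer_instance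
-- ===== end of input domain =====

-- B replaces the single sorted() on the composite (bucket, rank, id) key by a one-pass
-- partition into three bucket lists, a stable per-bucket sort on (rank, id), and
-- concatenation; structurally different, same cost (objective: alternative).

-- ===== PORT A =====
-- A-side helpers
def pvIssueId (issue : List (String × String)) : String :=
  (PySem.Dict.mk issue).getD "id" ""          -- str(issue.get("id") or "")

def pvTitleLower (issue : List (String × String)) : String :=
  -- str(issue.get("title_en") or issue.get("title") or "").lower()
  let t := (PySem.Dict.mk issue).getD "title_en" ""
  PySem.Str.lower (if t = "" then (PySem.Dict.mk issue).getD "title" "" else t)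

def pvTokens : List String :=
  ["unused", "render-blocking", "cache", "image", "document-latency",
   "server-response", "network", "redirect", "font-display"]

def pvPhrases : List String :=
  ["use ", "reduce ", "eliminate ", "improve ", "avoid ", "serve ", "defer "]

def pvMetricIds : List String :=
  ["largest-contentful-paint", "first-contentful-paint", "speed-index",
   "interactive", "max-potential-fid", "total-blocking-time", "cumulative-layout-shift"]

def pvInsightLike (issue : List (String × String)) : Bool :=
  PySem.Str.isIn "insight" (pvIssueId issue)
  || pvTokens.any (fun t => PySem.Str.isIn t (pvIssueId issue))
  || pvPhrases.any (fun p => PySem.Str.isIn p (pvTitleLower issue))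

def pvMetricLike (issue : List (String × String)) : Bool :=
  pvMetricIds.contains (pvIssueId issue)

def pvBucket (issue : List (String × String)) : Int :=
  if pvInsightLike issue then 0 else if pvMetricLike issue then 2 else 1

def pvRank (issue : List (String × String)) : Int :=
  -- priority_order.get(str(issue.get("priority") or "").upper(), 9), literal dict lookup
  let p := PySem.Str.upper ((PySem.Dict.mk issue).getD "priority" "")
  if p = "CRITICAL" then 0 else if p = "HIGH" then 1
  else if p = "MEDIUM" then 2 else if p = "LOW" then 3 else 9

-- normalized["issues"] = …  (key "issues" is present, so the overwrite keeps its position)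
def pvReplaceIssues (d : List (String × List (List (String × String))))
    (v : List (List (String × String))) : List (String × List (List (String × String))) :=
  d.map (fun p => if p.1 == "issues" then ("issues", v) else p)

def pvKeyA (issue : List (String × String)) : Int × Int × String :=
  (pvBucket issue, pvRank issue, pvIssueId issue)

-- Python's '<' on an (int, int, str) tuple: lexicographic, exact (hand-ported;
-- Lean's Prod LT is not lexicographic)
def pvLt3 (a b : Int × Int × String) : Bool :=
  decide (a.1 < b.1) || (a.1 == b.1 &&
    (decide (a.2.1 < b.2.1) || (a.2.1 == b.2.1 && decide (a.2.2 < b.2.2))))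

-- sorted(xs, key=issue_sort_key): stable insertion sort (= PySem.List.sorted's foldl shape)
def pvSortedA (issues : List (List (String × String))) : List (List (String × String)) :=
  issues.foldl (fun acc x => PySem.List.insertBy (fun a b => pvLt3 (pvKeyA a) (pvKeyA b)) x acc) []

def normalize_lighthouse_issue_order_py (analysis : Option (List (String × List (List (String × String))))) : Option (List (String × List (List (String × String)))) :=
  match analysis with
  | none => none                             -- not analysis (None)
  | some d =>
    if d = [] then some d                    -- not analysis (empty dict)
    else match (PySem.Dict.mk d).get? "issues" with
      | none => some d                       -- not analysis.get("issues") (missing)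
      | some [] => some d                    -- not analysis.get("issues") (empty list)
      | some issues => some (pvReplaceIssues d (pvSortedA issues))

-- ===== PORT B =====
-- B-side helpers (B's module constants and helper functions)
def pvInsightIdTokensB : List String :=
  ["insight", "unused", "render-blocking", "cache", "image", "document-latency",
   "server-response", "network", "redirect", "font-display"]

def pvActionPhrasesB : List String :=
  ["use ", "reduce ", "eliminate ", "improve ", "avoid ", "serve ", "defer "]

def pvMetricIdsB : List String :=         -- frozenset of distinct literals, as the distinct-element list
  ["largest-contentful-paint", "first-contentful-paint", "speed-index",
   "interactive", "max-potential-fid", "total-blocking-time", "cumulative-layout-shift"]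

def pvIssueIdB (issue : List (String × String)) : String :=
  (PySem.Dict.mk issue).getD "id" ""          -- str(issue.get("id") or "")

def pvBucketB (issue : List (String × String)) : Int :=
  if pvInsightIdTokensB.any (fun t => PySem.Str.isIn t (pvIssueIdB issue)) then 0
  else if pvActionPhrasesB.any (fun p => PySem.Str.isIn p
      (let t := (PySem.Dict.mk issue).getD "title_en" ""
       PySem.Str.lower (if t = "" then (PySem.Dict.mk issue).getD "title" "" else t))) then 0
  else if pvMetricIdsB.contains (pvIssueIdB issue) then 2
  else 1

def pvRankB (issue : List (String × String)) : Int :=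
  -- _PRIORITY_ORDER.get(str(issue.get("priority") or "").upper(), 9), literal dict lookup
  let p := PySem.Str.upper ((PySem.Dict.mk issue).getD "priority" "")
  if p = "CRITICAL" then 0 else if p = "HIGH" then 1
  else if p = "MEDIUM" then 2 else if p = "LOW" then 3 else 9

def pvReplaceIssuesB (d : List (String × List (List (String × String))))
    (v : List (List (String × String))) : List (String × List (List (String × String))) :=
  d.map (fun p => if p.1 == "issues" then ("issues", v) else p)

def pvSortBucket (l : List (List (String × String))) : List (List (String × String)) :=
  PySem.List.sorted2 l pvRankB pvIssueIdB      -- group.sort(key=lambda i: (_rank(i), _issue_id(i)))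

-- buckets[_bucket(issue)].append(issue), one loop iteration
def pvBucketStep
    (acc : List (List (String × String)) × List (List (String × String)) × List (List (String × String)))
    (x : List (String × String)) :
    List (List (String × String)) × List (List (String × String)) × List (List (String × String)) :=
  let b := pvBucketB x
  if b = 0 then (acc.1 ++ [x], acc.2.1, acc.2.2)
  else if b = 2 then (acc.1, acc.2.1, acc.2.2 ++ [x])
  else (acc.1, acc.2.1 ++ [x], acc.2.2)

def normalize_lighthouse_issue_order_py_alt (analysis : Option (List (String × List (List (String × String))))) : Option (List (String × List (List (String × String)))) :=
  match analysis with
  | none => none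
  | some d =>
    if d = [] then some d
    else
      let issuesOpt := (PySem.Dict.mk d).get? "issues"
      if issuesOpt = none ∨ issuesOpt = some [] then some d
      else
        let issues := issuesOpt.getD []
        -- for issue in issues: buckets[_bucket(issue)].append(issue)
        let bs := issues.foldl pvBucketStep ([], [], [])
        some (pvReplaceIssuesB d (pvSortBucket bs.1 ++ pvSortBucket bs.2.1 ++ pvSortBucket bs.2.2))

-- ===== PRECONDITION & SPEC =====
def Spec_normalize_lighthouse_issue_order_py (analysis : Option (List (String × List (List (String × String))))) (out : Option (List (String × List (List (String × String))))) : Prop := out = normalize_lighthouse_issue_order_py_alt analysis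
instance (analysis : Option (List (String × List (List (String × String))))) (out : Option (List (String × List (List (String × String))))) : Decidable (Spec_normalize_lighthouse_issue_order_py analysis out) := by unfold Spec_normalize_lighthouse_issue_order_py; infer_instance

-- ===== CLAIM (what is proved, stated in full; the proofs are below) =====
def Claim_equal_normalize_lighthouse_issue_order_py : Prop := ∀ (analysis : Option (List (String × List (List (String × String))))), Dom_normalize_lighthouse_issue_order_py analysis → Spec_normalize_lighthouse_issue_order_py analysis (normalize_lighthouse_issue_order_py analysis)

-- ===== LEMMAS AND PROOFS =====

-- B's helpers are transliterations of the same Python helper code: definitionally equal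
theorem pvIssueIdB_eq : pvIssueIdB = pvIssueId := rfl
theorem pvRankB_eq : pvRankB = pvRank := rfl
theorem pvBucketB_eq : pvBucketB = pvBucket := by
  funext issue
  simp only [pvBucketB, pvBucket, pvInsightLike, pvMetricLike, pvInsightIdTokensB,
    pvActionPhrasesB, pvMetricIdsB, pvTokens, pvPhrases, pvMetricIds, pvIssueIdB,
    pvIssueId, pvTitleLower, List.any_cons, Bool.or_assoc]
  split_ifs <;> simp_all
theorem pvReplaceIssuesB_eq : pvReplaceIssuesB = pvReplaceIssues := rfl

-- the comparison sorted2 uses on B's (rank, id) key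
def pvBefore2 (a b : List (String × String)) : Bool :=
  decide (pvRankB a < pvRankB b)
    || (!decide (pvRankB b < pvRankB a) && decide (pvIssueIdB a < pvIssueIdB b))

theorem pvSortBucket_eq_foldl (l : List (List (String × String))) :
    pvSortBucket l = l.foldl (fun acc x => PySem.List.insertBy pvBefore2 x acc) [] := rfl

theorem pvBucket_cases (x : List (String × String)) :
    pvBucket x = 0 ∨ pvBucket x = 1 ∨ pvBucket x = 2 := by
  unfold pvBucket; split_ifs <;> simp

theorem insertBy_append_all_true {α : Type} (before : α → α → Bool) (x : α)
    (l1 l2 : List α) (h : ∀ z ∈ l2, before x z = true) :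
    PySem.List.insertBy before x (l1 ++ l2) = PySem.List.insertBy before x l1 ++ l2 := by
  induction l1 with
  | nil =>
    cases l2 with
    | nil => simp [PySem.List.insertBy]
    | cons z t => simp [PySem.List.insertBy, h z (by simp)]
  | cons y ys ih =>
    simp only [List.cons_append, PySem.List.insertBy]
    by_cases hb : before x y <;> simp [hb, ih]

theorem insertBy_append_all_false {α : Type} (before : α → α → Bool) (x : α)
    (l1 l2 : List α) (h : ∀ z ∈ l1, before x z = false) :
    PySem.List.insertBy before x (l1 ++ l2) = l1 ++ PySem.List.insertBy before x l2 := by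
  induction l1 with
  | nil => simp
  | cons y ys ih =>
    simp only [List.cons_append, PySem.List.insertBy, h y (by simp)]
    simp only [Bool.false_eq_true, if_false, List.cons_inj_right]
    exact ih (fun z hz => h z (by simp [hz]))

theorem insertBy_congr_mem {α : Type} (before before' : α → α → Bool) (x : α)
    (l : List α) (h : ∀ y ∈ l, before x y = before' x y) :
    PySem.List.insertBy before x l = PySem.List.insertBy before' x l := by
  induction l with
  | nil => rfl
  | cons y ys ih =>
    simp only [PySem.List.insertBy, h y (by simp)]
    rw [ih (fun z hz => h z (by simp [hz]))]

-- on two issues of the same bucket, Python's 3-tuple '<' is sorted2's (rank, id) comparison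
theorem pvLt3_eq_before2 (x y : List (String × String)) (h : pvBucket x = pvBucket y) :
    pvLt3 (pvKeyA x) (pvKeyA y) = pvBefore2 x y := by
  simp only [pvLt3, pvKeyA, pvBefore2, pvRankB_eq, pvIssueIdB_eq, h]
  rcases lt_trichotomy (pvRank x) (pvRank y) with hr | hr | hr
  · simp [hr, not_lt_of_gt hr]
  · simp [hr]
  · simp [hr, beq_eq_false_iff_ne.mpr (ne_of_gt hr)]

-- the bucket of x decides where insertBy places x relative to other buckets
theorem pvLt3_true_of_bucket_lt (x y : List (String × String))
    (h : pvBucket x < pvBucket y) : pvLt3 (pvKeyA x) (pvKeyA y) = true := by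
  simp [pvLt3, pvKeyA, h]

theorem pvLt3_false_of_bucket_gt (x y : List (String × String))
    (h : pvBucket y < pvBucket x) : pvLt3 (pvKeyA x) (pvKeyA y) = false := by
  simp [pvLt3, pvKeyA, not_lt_of_gt h, ne_of_gt h]

theorem mem_pvSortBucket {y : List (String × String)} {l : List (List (String × String))} :
    y ∈ pvSortBucket l ↔ y ∈ l := by
  exact (PySem.List.sorted2_perm l pvRank pvIssueId false).mem_iff

-- sorted2 consumes its input left to right
theorem pvSortBucket_snoc (l : List (List (String × String))) (x : List (String × String)) :
    pvSortBucket (l ++ [x])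
      = PySem.List.insertBy pvBefore2 x (pvSortBucket l) := by
  simp [pvSortBucket_eq_foldl, List.foldl_append]

-- MAIN: A's one composite sort = B's partition + per-bucket sorts, concatenated
theorem pvSortedA_eq (xs : List (List (String × String))) :
    pvSortedA xs
      = pvSortBucket (xs.filter (fun x => pvBucket x == 0))
        ++ pvSortBucket (xs.filter (fun x => pvBucket x == 1))
        ++ pvSortBucket (xs.filter (fun x => pvBucket x == 2)) := by
  induction xs using List.reverseRecOn with
  | nil => simp [pvSortedA, pvSortBucket, PySem.List.sorted2]
  | append_singleton xs x ih =>
    have hsnoc : pvSortedA (xs ++ [x])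
        = PySem.List.insertBy (fun a b => pvLt3 (pvKeyA a) (pvKeyA b)) x (pvSortedA xs) := by
      simp [pvSortedA, List.foldl_append]
    rw [hsnoc, ih]
    have hmem0 : ∀ y ∈ pvSortBucket (xs.filter (fun x => pvBucket x == 0)), pvBucket y = 0 := by
      intro y hy
      have := mem_pvSortBucket.1 hy
      simpa using (List.of_mem_filter this)
    have hmem1 : ∀ y ∈ pvSortBucket (xs.filter (fun x => pvBucket x == 1)), pvBucket y = 1 := by
      intro y hy
      have := mem_pvSortBucket.1 hy
      simpa using (List.of_mem_filter this)
    have hmem2 : ∀ y ∈ pvSortBucket (xs.filter (fun x => pvBucket x == 2)), pvBucket y = 2 := by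
      intro y hy
      have := mem_pvSortBucket.1 hy
      simpa using (List.of_mem_filter this)
    rcases pvBucket_cases x with hb | hb | hb
    · -- bucket 0: insert into the first segment
      have htrue : ∀ z ∈ pvSortBucket (xs.filter (fun x => pvBucket x == 1))
          ++ pvSortBucket (xs.filter (fun x => pvBucket x == 2)),
          pvLt3 (pvKeyA x) (pvKeyA z) = true := by
        intro z hz
        rcases List.mem_append.1 hz with hz | hz
        · exact pvLt3_true_of_bucket_lt x z (by rw [hb, hmem1 z hz]; norm_num)
        · exact pvLt3_true_of_bucket_lt x z (by rw [hb, hmem2 z hz]; norm_num)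
      have hcongr : ∀ y ∈ pvSortBucket (xs.filter (fun x => pvBucket x == 0)),
          pvLt3 (pvKeyA x) (pvKeyA y) = pvBefore2 x y := by
        intro y hy; exact pvLt3_eq_before2 x y (by rw [hb, hmem0 y hy])
      rw [List.append_assoc, insertBy_append_all_true _ x _ _ htrue,
        insertBy_congr_mem _ pvBefore2 x _ hcongr]
      simp [hb, List.filter_append, pvSortBucket_snoc, List.append_assoc]
    · -- bucket 1: skip segment 0, insert into segment 1
      have hfalse : ∀ z ∈ pvSortBucket (xs.filter (fun x => pvBucket x == 0)),
          pvLt3 (pvKeyA x) (pvKeyA z) = false := by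
        intro z hz
        exact pvLt3_false_of_bucket_gt x z (by rw [hb, hmem0 z hz]; norm_num)
      have htrue : ∀ z ∈ pvSortBucket (xs.filter (fun x => pvBucket x == 2)),
          pvLt3 (pvKeyA x) (pvKeyA z) = true := by
        intro z hz
        exact pvLt3_true_of_bucket_lt x z (by rw [hb, hmem2 z hz]; norm_num)
      have hcongr : ∀ y ∈ pvSortBucket (xs.filter (fun x => pvBucket x == 1)),
          pvLt3 (pvKeyA x) (pvKeyA y) = pvBefore2 x y := by
        intro y hy; exact pvLt3_eq_before2 x y (by rw [hb, hmem1 y hy])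
      rw [List.append_assoc, insertBy_append_all_false _ x _ _ hfalse,
        insertBy_append_all_true _ x _ _ htrue,
        insertBy_congr_mem _ pvBefore2 x _ hcongr]
      simp [hb, List.filter_append, pvSortBucket_snoc, List.append_assoc]
    · -- bucket 2: skip segments 0 and 1, insert into segment 2
      have hfalse0 : ∀ z ∈ pvSortBucket (xs.filter (fun x => pvBucket x == 0)),
          pvLt3 (pvKeyA x) (pvKeyA z) = false := by
        intro z hz
        exact pvLt3_false_of_bucket_gt x z (by rw [hb, hmem0 z hz]; norm_num)
      have hfalse1 : ∀ z ∈ pvSortBucket (xs.filter (fun x => pvBucket x == 1)),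
          pvLt3 (pvKeyA x) (pvKeyA z) = false := by
        intro z hz
        exact pvLt3_false_of_bucket_gt x z (by rw [hb, hmem1 z hz]; norm_num)
      have hcongr : ∀ y ∈ pvSortBucket (xs.filter (fun x => pvBucket x == 2)),
          pvLt3 (pvKeyA x) (pvKeyA y) = pvBefore2 x y := by
        intro y hy; exact pvLt3_eq_before2 x y (by rw [hb, hmem2 y hy])
      rw [List.append_assoc, insertBy_append_all_false _ x _ _ hfalse0,
        insertBy_append_all_false _ x _ _ hfalse1,
        insertBy_congr_mem _ pvBefore2 x _ hcongr]
      simp [hb, List.filter_append, pvSortBucket_snoc, List.append_assoc]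

-- B's partition fold computes the three filters
theorem pvPartition_eq (xs : List (List (String × String)))
    (a b c : List (List (String × String))) :
    xs.foldl pvBucketStep (a, b, c)
      = (a ++ xs.filter (fun x => pvBucket x == 0),
         b ++ xs.filter (fun x => pvBucket x == 1),
         c ++ xs.filter (fun x => pvBucket x == 2)) := by
  induction xs generalizing a b c with
  | nil => simp
  | cons x t ih =>
    rcases pvBucket_cases x with hb | hb | hb <;>
      simp [pvBucketStep, pvBucketB_eq, hb, ih, List.append_assoc]

-- ===== VERDICT (by name: the statement is the Claim_ definition above) =====
theorem normalize_lighthouse_issue_order_py_spec : Claim_equal_normalize_lighthouse_issue_order_py := by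
  intro analysis _
  unfold Spec_normalize_lighthouse_issue_order_py
  unfold normalize_lighthouse_issue_order_py normalize_lighthouse_issue_order_py_alt
  cases analysis with
  | none => rfl
  | some d =>
    by_cases hd : d = []
    · simp [hd]
    · simp only [hd, if_false]
      cases hget : (PySem.Dict.mk d).get? "issues" with
      | none => rfl
      | some issues =>
        cases issues with
        | nil => rfl
        | cons i t =>
          simp only [pvReplaceIssuesB_eq]
          rw [pvSortedA_eq, pvPartition_eq]
          simp
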